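/- GENERATED by mk_final_copies.py from the proof of the farm's unit `start_decoder.F6a` (farm:start_decoder.F6a.1: Proof.lean) as the
   re-elaboration sweep compiled it — do not edit. -/
import Asan.CheckWalk
import Vorbis.Spec.Units.start_decoder_F6a
import Vorbis.Spec.StartDecoderFloor

open X86 X86.User Asan Vorbis Vorbis.Spec Vorbis.Spec.StartDecoder

set_option maxRecDepth 100000
set_option maxHeartbeats 4000000

namespace Vorbis.Spec.start_decoder_F6a

/-- 0x115714 – 0x115719 (`mov r12d, [rsp+24H] ; jmp 115768`): from `InF6` at the entry of F6 to the head of loop 4015 with `j = 0`.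
Nothing is written: `Floor.carry_quiet` with the empty window list moves the loop assertion to the new address. -/
theorem f6a_walk (Lay : Layout) (hLay : Lay.hi = 0x1000000) (μ : Microarch) (hμ : UserX.MicroOK μ) (u₀ : State)
    (hcode : HasCodeNat Lay u₀ Vorbis.L.start_decoder.entry Vorbis.Code.code_start_decoder.nat Vorbis.L.start_decoder.size)
    (g : Ghost) (i : Nat) (A5 : Arena) (A : Arena × List Obj) (mc : Int) (n : Nat) (v : State)
    (h : InF6 u₀ g i A5 A mc n pc_F6 v) : ReachVia Lay μ WayInv v (fun w => AtF6P u₀ g i w) := by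
  have hlt : (i : Int) < stb_vorbis.floor_count v.mem g.f := h.cur.base.base.lt
  have hgeo := Floor.geo h.loop hlt
  have hfr := h.loop.frame
  have r8 := hgeo.r8
  have rlo := hgeo.rlo
  have rhi := hgeo.rhi
  obtain ⟨sp, hsp⟩ : ∃ sp : Word, sp = addr g.R := ⟨_, rfl⟩
  have hspn : sp.toNat = g.R := by
    rw [hsp]
    exact toNat_addr _ (by omega)
  have w_rip := hfr.rip
  have w_rsp : v.reg .rsp = sp := by
    rw [hsp]
    exact hfr.rsp
  have w_eq : Mem.EqOn Vorbis.L.textLo Vorbis.L.textHi u₀.mem v.mem := hfr.code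
  have hdf : v.flags .df = false := (show abiInv _ from hfr.inv).1
  have hmx : v.mxcsr &&& 0x1F80 = 0x1F80 := (show abiInv _ from hfr.inv).2
  have hsse := Vorbis.sseOK_of_abiInv hfr.inv
  -- the literal 0 of `d[R+24H]` (Z24)
  have z24 : v.mem.readLE (sp + 36) 4 = 0 := by
    have hz := h.loop.mid.consts.z24 (by omega) (by omega)
    rw [hsp]
    simp only [vfield]
    exact hz
  u_walk hcode [hμ.vendor] until [Vorbis.L.start_decoder.loop23] span [Vorbis.L.textLo, Vorbis.L.textHi] side (v_side)
  apply ReachVia.done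
  unfold AtF6P
  refine ⟨A5, A, mc, n, 0, ⟨?_, ?_, ?_, h.n_le⟩, w_r12, ?_, PFill.zero _ _⟩
  · refine Floor.carry_quiet (ws := []) (lo := 0) (hi := 0) h.loop hlt (by omega) w_rip ?_ ?_ (by v_inv) ?_ ?_ ?_ ?_
    · rw [w_kept.get .rsp rfl]
      exact hfr.rsp
    · rw [w_kept.get .rbp rfl]
      exact h.loop.rbp
    · exact w_eq
    · rw [w_mem]
      exact Mem.SameExcept.refl _ _
    · intro w hw
      exact absurd hw List.not_mem_nil
    · rw [w_mem]
      exact Mem.EqOn.refl _ _ _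
  · rw [w_kept.get .rbx rfl, w_mem]
    exact h.rbx
  · rw [w_mem]
    exact h.cur
  · rw [w_mem]
    have h8 := h.cur.FL8
    omega

end Vorbis.Spec.start_decoder_F6a

theorem Vorbis.Spec.Worked.start_decoder_F6a_ok : Vorbis.Spec.start_decoder_F6a.Statement := by
  intro Lay hLay μ hμ u₀ hcode g i v hat
  obtain ⟨A5, A, mc, n, hb⟩ := hat
  exact Vorbis.Spec.start_decoder_F6a.f6a_walk Lay hLay μ hμ u₀ hcode g i A5 A mc (min n 16) v
    (Vorbis.Spec.StartDecoder.F6.inF6_of_body hb)
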